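-- pv_equiv track=rewrite | github.com/cheokfoong/Data-Structures-and-Algorithms | Assignment1 (Z-algorithm)/q1/Z_algo.py | reverse_z_algorithm
-- ===== SOURCE A (Python) =====
-- def reverse_z_algorithm(string):
--     """
--     creates z-array for suffix matching
--     :complexity: O(N), where N is length of string
--     """
--     z_array = len(string) * [None]
--     N = len(string) - 1
--     z_array[N] = len(string)
--     z_box = [N,N] # stores the first and last index of the matching substring to the prefix in the string
--
--     for i in range(N -1, -1, -1):
--         suffix = N
--         index = i
--         substring = i # right end of z_box
--         count = 0
--
--         if index < z_box[0] and index >= z_box[1]: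
--             k = N - abs(index - z_box[0])
--             remaining = abs(z_box[1] - index - 1)
--
--             if z_array[k] < remaining:
--                 z_array[i] = z_array[k]
--
--             elif z_array[k] > remaining:
--                 z_array[i] = remaining
--
--             #if z_array[k] == remaining
--             else:
--                 # compute Z[R+1] first
--                 after_R = z_box[1] - 1
--
--                 #if Z[R+1] is out of range
--                 if after_R < 0:
--                     z_array[i] = z_array[k]
--
--                 else:
--                     suffix -= z_array[k]
--                     while after_R >= 0 and string[after_R] == string[suffix]:
--                         count += 1
--                         suffix -= 1
--                         after_R -= 1
--
--                     # if a substring/z_box exist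
--                     if after_R < index:
--                         z_box[0] = index
--                         z_box[1] = after_R +1
--
--                     z_array[i] = z_array[k] + count
--
--         else:
--             while substring >= 0 and string[substring] == string[suffix]:
--                 count += 1
--                 suffix -= 1
--                 substring -= 1
--
--             # if a substring/z_box exist
--             if substring < index:
--                 z_box[0] = index
--                 z_box[1] = substring +1
--             z_array[i] = count
--
--     return z_array
-- ===== SOURCE B (Python) =====
-- def reverse_z_algorithm(string):
--     """
--     creates z-array for suffix matching; direct per-index suffix matching
--     """
--     n = len(string)
--     z_array = [n] * n
--     for i in range(n - 1):
--         count = 0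
--         while count <= i and string[i - count] == string[n - 1 - count]:
--             count += 1
--         z_array[i] = count
--     return z_array
-- ===== Notes on version B (the rewrite author's own statement) =====
-- stated objective: simpler
-- what changed: Replaced the hand-rolled z-box window reuse algorithm (mirrored z-values, box extension, case analysis) with a plain per-index suffix-matching loop over a pre-filled array.
import Mathlib
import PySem

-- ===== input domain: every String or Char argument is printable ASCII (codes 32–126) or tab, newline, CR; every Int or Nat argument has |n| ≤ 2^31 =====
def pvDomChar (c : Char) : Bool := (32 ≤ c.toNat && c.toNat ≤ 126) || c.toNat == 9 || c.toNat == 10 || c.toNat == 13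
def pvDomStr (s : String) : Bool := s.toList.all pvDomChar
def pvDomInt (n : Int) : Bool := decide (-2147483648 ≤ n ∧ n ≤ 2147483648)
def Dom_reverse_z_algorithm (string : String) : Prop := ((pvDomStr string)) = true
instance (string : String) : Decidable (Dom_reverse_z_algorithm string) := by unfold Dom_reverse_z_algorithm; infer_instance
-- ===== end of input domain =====

-- B replaces A's z-box window-reuse reverse-Z algorithm by a plain per-index suffix-matching loop (simpler, not faster).


-- ===== PORT A =====
-- The two identical while-loops of A ('while idx >= 0 and string[idx] == string[suffix]: count += 1; …'):
-- returns (count, final value of the left index).  Indices reaching string[·] are nonnegative and in range on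
-- every input admitted by Pre_, so the Option-equality of pyGet? is exactly Python's char comparison there.
def pvAScan (l : List Char) (a b : Int) : Nat × Int :=
  if 0 ≤ a ∧ PySem.List.pyGet? l a = PySem.List.pyGet? l b then
    let r := pvAScan l (a - 1) (b - 1)
    (r.1 + 1, r.2)
  else (0, a)
termination_by (a + 1).toNat
decreasing_by omega

-- one iteration of A's 'for i in range(N-1, -1, -1)' body; state = (z_array, z_box[0], z_box[1])
def pvAStep (l : List Char) (n : Int) (st : List Int × Int × Int) (i : Int) : List Int × Int × Int :=
  let N := n - 1
  let z := st.1
  let L := st.2.1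
  let R := st.2.2
  if i < L ∧ R ≤ i then
    let k : Int := N - ((i - L).natAbs : Int)
    let zk := PySem.List.pyGetD z k 0
    let remaining : Int := ((R - i - 1).natAbs : Int)
    if zk < remaining then (PySem.List.pySetD z i zk, L, R)
    else if remaining < zk then (PySem.List.pySetD z i remaining, L, R)
    else
      let after_R := R - 1
      if after_R < 0 then (PySem.List.pySetD z i zk, L, R)
      else
        let suffix := N - zk
        let r := pvAScan l after_R suffix
        let box := if r.2 < i then (i, r.2 + 1) else (L, R)
        (PySem.List.pySetD z i (zk + (r.1 : Int)), box)
  else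
    let r := pvAScan l i N
    let box := if r.2 < i then (i, r.2 + 1) else (L, R)
    (PySem.List.pySetD z i (r.1 : Int), box)

def reverse_z_algorithm (string : String) : List Int :=
  let l := string.toList
  let n : Int := l.length
  -- z_array = len(string)*[None]: every cell is written before it is read (0 is a mere placeholder, List Int);
  -- z_array[N] = len(string) raises IndexError when the string is empty — Pre_ excludes "".
  let N := n - 1
  let z1 := PySem.List.pySetD (List.replicate l.length (0 : Int)) N n
  let res := (PySem.List.pyRange (N - 1) (-1) (-1)).foldl (pvAStep l n) (z1, N, N)
  res.1

-- ===== PORT B =====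
-- B's inner 'while count <= i and string[i-count] == string[n-1-count]': all indices are in range here.
def pvBScan (l : List Char) (n i c : Nat) : Nat :=
  if c ≤ i ∧ l[i - c]? = l[n - 1 - c]? then pvBScan l n i (c + 1) else c
termination_by i + 1 - c
decreasing_by omega

def reverse_z_algorithm_alt (string : String) : List Int :=
  let l := string.toList
  let n := l.length
  (List.range (n - 1)).foldl (fun z i => z.set i ((pvBScan l n i 0 : Int))) (List.replicate n (n : Int))

-- ===== PRECONDITION & SPEC =====
-- Pre_ excludes only the empty string, on which A raises IndexError (z_array[-1] on an empty list).
def Pre_reverse_z_algorithm (string : String) : Prop := string ≠ ""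
instance (string : String) : Decidable (Pre_reverse_z_algorithm string) := by unfold Pre_reverse_z_algorithm; infer_instance
def pvWitness_reverse_z_algorithm : String := "aba"

def Spec_reverse_z_algorithm (string : String) (out : List Int) : Prop := out = reverse_z_algorithm_alt string
instance (string : String) (out : List Int) : Decidable (Spec_reverse_z_algorithm string out) := by unfold Spec_reverse_z_algorithm; infer_instance

-- ===== CLAIM (what is proved, stated in full; the proofs are below) =====
def Claim_equal_reverse_z_algorithm : Prop := ∀ (string : String), Dom_reverse_z_algorithm string → Pre_reverse_z_algorithm string → Spec_reverse_z_algorithm string (reverse_z_algorithm string)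


-- ===== LEMMAS AND PROOFS =====

-- unfolding lemmas for A's scan loop
lemma pvAScan_pos (l : List Char) (a b : Int)
    (h : 0 ≤ a ∧ PySem.List.pyGet? l a = PySem.List.pyGet? l b) :
    pvAScan l a b = ((pvAScan l (a - 1) (b - 1)).1 + 1, (pvAScan l (a - 1) (b - 1)).2) := by
  rw [pvAScan]; simp [h]

lemma pvAScan_neg (l : List Char) (a b : Int)
    (h : ¬ (0 ≤ a ∧ PySem.List.pyGet? l a = PySem.List.pyGet? l b)) :
    pvAScan l a b = (0, a) := by
  rw [pvAScan]; simp [h]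

-- the final left index of the scan is start minus count
lemma pvAScan_snd (l : List Char) (a b : Int) : (pvAScan l a b).2 = a - ((pvAScan l a b).1 : Int) := by
  fun_induction pvAScan l a b with
  | case1 a b h r ih => simp only [r]; push_cast at ih ⊢; omega
  | case2 a b h => simp

-- every position below the count matched
lemma pvAScan_matches (l : List Char) (a b : Int) (t : Nat)
    (ht : (t : Int) < ((pvAScan l a b).1 : Int)) :
    0 ≤ a - t ∧ PySem.List.pyGet? l (a - t) = PySem.List.pyGet? l (b - t) := by
  induction t generalizing a b with
  | zero =>
    by_cases h : 0 ≤ a ∧ PySem.List.pyGet? l a = PySem.List.pyGet? l b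
    · simpa using h
    · rw [pvAScan_neg l a b h] at ht; exact absurd ht (by push_cast; omega)
  | succ t ih =>
    by_cases h : 0 ≤ a ∧ PySem.List.pyGet? l a = PySem.List.pyGet? l b
    · rw [pvAScan_pos l a b h] at ht
      have := ih (a - 1) (b - 1) (by simp at ht; omega)
      refine ⟨by omega, ?_⟩
      have e1 : a - 1 - t = a - (t + 1 : Nat) := by push_cast; ring
      have e2 : b - 1 - t = b - (t + 1 : Nat) := by push_cast; ring
      rw [e1, e2] at this; exact this.2
    · rw [pvAScan_neg l a b h] at ht; simp at ht; exact absurd ht (by omega)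

-- at the count itself the scan stopped: out of range or a mismatch
lemma pvAScan_stop (l : List Char) (a b : Int) :
    ¬ (0 ≤ a - ((pvAScan l a b).1 : Int) ∧
       PySem.List.pyGet? l (a - ((pvAScan l a b).1 : Int)) = PySem.List.pyGet? l (b - ((pvAScan l a b).1 : Int))) := by
  fun_induction pvAScan l a b with
  | case1 a b h r ih =>
    simp only [r]
    have e1 : a - ((pvAScan l (a-1) (b-1)).1 + 1 : Nat) = (a - 1) - ((pvAScan l (a-1) (b-1)).1 : Int) := by push_cast; ring
    have e2 : b - ((pvAScan l (a-1) (b-1)).1 + 1 : Nat) = (b - 1) - ((pvAScan l (a-1) (b-1)).1 : Int) := by push_cast; ring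
    rw [e1, e2]; exact ih
  | case2 a b h => simpa using h

-- the scan count is determined by matches-then-stop
lemma pvAScan_eq_of (l : List Char) (c : Nat) : ∀ (a b : Int),
    (∀ t : Nat, t < c → 0 ≤ a - t ∧ PySem.List.pyGet? l (a - t) = PySem.List.pyGet? l (b - t)) →
    ¬ (0 ≤ a - (c : Int) ∧ PySem.List.pyGet? l (a - c) = PySem.List.pyGet? l (b - c)) →
    (pvAScan l a b).1 = c := by
  induction c with
  | zero => intro a b _ h2; rw [pvAScan_neg l a b (by simpa using h2)]
  | succ c ih =>
    intro a b h1 h2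
    have h0 := h1 0 (by omega)
    simp only [Nat.cast_zero, sub_zero] at h0
    rw [pvAScan_pos l a b h0]
    have := ih (a - 1) (b - 1)
      (fun t ht => by
        have := h1 (t + 1) (by omega)
        refine ⟨by push_cast at this ⊢; omega, ?_⟩
        have e1 : a - 1 - t = a - (t + 1 : Nat) := by push_cast; ring
        have e2 : b - 1 - t = b - (t + 1 : Nat) := by push_cast; ring
        rw [e1, e2]; exact this.2)
      (by
        have e1 : a - 1 - (c : Int) = a - ((c + 1 : Nat) : Int) := by push_cast; ring
        have e2 : b - 1 - (c : Int) = b - ((c + 1 : Nat) : Int) := by push_cast; ring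
        rw [e1, e2]; exact h2)
    simp [this]

lemma pvAScan_fst_le (l : List Char) (a b : Int) :
    ((pvAScan l a b).1 : Int) ≤ a + 1 ∨ (pvAScan l a b).1 = 0 := by
  rcases Nat.eq_zero_or_pos (pvAScan l a b).1 with h | h
  · exact Or.inr h
  · left
    have := pvAScan_matches l a b ((pvAScan l a b).1 - 1) (by omega)
    omega

-- the z-value A's algorithm is meant to compute at index i (A's own naive scan)
def pvM (l : List Char) (i : Nat) : Nat := (pvAScan l (i : Int) ((l.length : Int) - 1)).1

-- B's scan equals A's scan (counting up vs counting down)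
lemma pvBScan_eq (l : List Char) (i : Nat) (hi : i + 1 ≤ l.length - 1) :
    ∀ d c, i + 1 - c ≤ d → c ≤ i + 1 →
    pvBScan l l.length i c = c + (pvAScan l ((i : Int) - c) ((l.length : Int) - 1 - c)).1 := by
  intro d
  induction d with
  | zero =>
    intro c hd hc
    have hc' : c = i + 1 := by omega
    subst hc'
    rw [pvBScan, if_neg (by omega)]
    rw [pvAScan_neg l _ _ (by push_cast; omega)]
    simp
  | succ d ih =>
    intro c hd hc
    by_cases hci : c ≤ i
    · have e1 : ((i : Int) - c) = ((i - c : Nat) : Int) := by omega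
      have e2 : ((l.length : Int) - 1 - c) = ((l.length - 1 - c : Nat) : Int) := by omega
      by_cases hch : l[i - c]? = l[l.length - 1 - c]?
      · rw [pvBScan, if_pos ⟨hci, hch⟩]
        rw [pvAScan_pos l _ _ ⟨by omega, by rw [e1, e2, PySem.List.pyGet?_natCast, PySem.List.pyGet?_natCast]; exact hch⟩]
        have := ih (c + 1) (by omega) (by omega)
        have e3 : ((i : Int) - c - 1) = ((i : Int) - (c + 1 : Nat)) := by push_cast; ring
        have e4 : ((l.length : Int) - 1 - c - 1) = ((l.length : Int) - 1 - (c + 1 : Nat)) := by push_cast; ring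
        rw [e3, e4, this]
        omega
      · rw [pvBScan, if_neg (by tauto)]
        rw [pvAScan_neg l _ _ (by rw [e1, e2, PySem.List.pyGet?_natCast, PySem.List.pyGet?_natCast]; tauto)]
        simp
    · have hc' : c = i + 1 := by omega
      subst hc'
      rw [pvBScan, if_neg (by omega)]
      rw [pvAScan_neg l _ _ (by push_cast; omega)]
      simp

lemma pvBScan_eq_pvM (l : List Char) (i : Nat) (hi : i + 1 ≤ l.length - 1) :
    pvBScan l l.length i 0 = pvM l i := by
  have := pvBScan_eq l i hi (i + 1) 0 (by omega) (by omega)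
  simpa [pvM] using this

-- getD/set/replicate facts for the array bookkeeping
lemma pv_getD_set (xs : List Int) (i j : Nat) (v : Int) :
    (xs.set i v).getD j 0 = if i = j ∧ i < xs.length then v else xs.getD j 0 := by
  by_cases hlt : i < xs.length
  · by_cases hij : i = j
    · subst hij
      simp [List.getD_eq_getElem?_getD, hlt]
    · simp [List.getD_eq_getElem?_getD, hij]
  · rw [List.set_eq_of_length_le (by omega)]
    rw [if_neg (by tauto)]

lemma pv_getD_replicate (n j : Nat) (x : Int) :
    (List.replicate n x).getD j 0 = if j < n then x else 0 := by
  rw [List.getD_eq_getElem?_getD, List.getElem?_replicate]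
  split_ifs <;> simp

-- B's write-loop characterized cell by cell
lemma pv_foldl_set_length (f : Nat → Int) (m : Nat) (z : List Int) :
    ((List.range m).foldl (fun z i => z.set i (f i)) z).length = z.length := by
  induction m generalizing z with
  | zero => simp
  | succ m ih => rw [List.range_succ, List.foldl_append]; simp [ih]

lemma pv_foldl_set_getD (f : Nat → Int) (m : Nat) (z : List Int) (j : Nat) :
    ((List.range m).foldl (fun z i => z.set i (f i)) z).getD j 0 =
      if j < m ∧ j < z.length then f j else z.getD j 0 := by
  induction m generalizing z with
  | zero => simp
  | succ m ih =>
    rw [List.range_succ, List.foldl_append]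
    simp only [List.foldl_cons, List.foldl_nil]
    rw [pv_getD_set, ih, pv_foldl_set_length]
    by_cases hj : m = j
    · subst hj; split_ifs <;> first | rfl | omega
    · rw [if_neg (by tauto)]; split_ifs <;> first | rfl | omega

-- invariant of A's main loop after all indices ≥ m (below N) have been processed
def pvInv (l : List Char) (m : Nat) (st : List Int × Int × Int) : Prop :=
  st.1.length = l.length ∧
  (∀ j : Nat, j < l.length →
     st.1.getD j 0 = if j = l.length - 1 then (l.length : Int)
                     else if m ≤ j then (pvM l j : Int) else 0) ∧
  ((st.2.1 = (l.length : Int) - 1 ∧ st.2.2 = (l.length : Int) - 1) ∨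
   (∃ Ln Rn : Nat, st.2.1 = (Ln : Int) ∧ st.2.2 = (Rn : Int) ∧
      m ≤ Ln ∧ Ln + 1 ≤ l.length - 1 ∧ Rn ≤ Ln ∧ pvM l Ln = Ln - Rn + 1))

-- after writing cell i, the cell table moves from bound i+1 to bound i
lemma pvCells_update (l : List Char) (i : Nat) (z : List Int) (hi : i + 1 ≤ l.length - 1)
    (hlen : z.length = l.length)
    (hcells : ∀ j : Nat, j < l.length →
      z.getD j 0 = if j = l.length - 1 then (l.length : Int) else if i + 1 ≤ j then (pvM l j : Int) else 0)
    (v : Int) (hv : v = (pvM l i : Int)) :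
    ∀ j : Nat, j < l.length →
      (z.set i v).getD j 0 = if j = l.length - 1 then (l.length : Int) else if i ≤ j then (pvM l j : Int) else 0 := by
  intro j hj
  rw [pv_getD_set]
  by_cases hji : i = j
  · subst hji
    rw [if_pos ⟨rfl, by omega⟩, if_neg (by omega), if_pos le_rfl]
    exact hv
  · rw [if_neg (by tauto), hcells j hj]
    split_ifs <;> first | rfl | omega

theorem pvStep_inv (l : List Char) (i : Nat) (hi : i + 1 ≤ l.length - 1)
    (st : List Int × Int × Int) (h : pvInv l (i + 1) st) :
    pvInv l i (pvAStep l (l.length : Int) st (i : Int)) := by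
  obtain ⟨z, L, R⟩ := st
  obtain ⟨hlen, hcells, hbox⟩ := h
  have hn2 : 2 ≤ l.length := by omega
  by_cases hbr : ((i : Int) < L ∧ R ≤ (i : Int))
  · -- the z-box mirror branch
    rcases hbox with ⟨hL, hR⟩ | ⟨Ln, Rn, hL, hR, hmLn, hLnN, hRnLn, hMLn⟩
    · exfalso
      have hL' : L = (l.length : Int) - 1 := hL
      have hR' : R = (l.length : Int) - 1 := hR
      rw [hL', hR'] at hbr; omega
    subst hL; subst hR
    have hiLn : i < Ln := by exact_mod_cast hbr.1
    have hRni : Rn ≤ i := by exact_mod_cast hbr.2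
    set kN : Nat := l.length - 1 - Ln + i with hkN
    set rem : Nat := i + 1 - Rn with hrem
    have hk1 : i + 1 ≤ kN := by omega
    have hk2 : kN + 1 ≤ l.length - 1 := by omega
    have hremle : rem ≤ i + 1 := by omega
    have ezk : z.getD kN 0 = (pvM l kN : Int) := by
      rw [hcells kN (by omega), if_neg (by omega), if_pos (by omega)]
    have hMir : ∀ t : Nat, t < rem →
        PySem.List.pyGet? l ((i : Int) - t) = PySem.List.pyGet? l ((kN : Int) - t) := by
      intro t ht
      have hu := pvAScan_matches l (Ln : Int) ((l.length : Int) - 1) (Ln - i + t)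
        (by
          have hf : (pvAScan l (Ln : Int) ((l.length : Int) - 1)).1 = pvM l Ln := rfl
          rw [hf, hMLn]; omega)
      have ei : (Ln : Int) - ((Ln - i + t : Nat) : Int) = (i : Int) - t := by omega
      have ej : ((l.length : Int) - 1) - ((Ln - i + t : Nat) : Int) = (kN : Int) - t := by omega
      rw [ei, ej] at hu
      exact hu.2
    have kMat : ∀ t : Nat, t < pvM l kN →
        0 ≤ (kN : Int) - t ∧ PySem.List.pyGet? l ((kN : Int) - t) = PySem.List.pyGet? l ((l.length : Int) - 1 - t) := by
      intro t ht
      exact pvAScan_matches l (kN : Int) ((l.length : Int) - 1) t (by exact_mod_cast ht)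
    simp only [pvAStep]
    rw [if_pos hbr]
    have e1 : ((l.length : Int) - 1 - ((((i : Int) - (Ln : Int)).natAbs : Nat) : Int)) = (kN : Int) := by omega
    have e2 : ((((Rn : Int) - (i : Int) - 1).natAbs : Nat) : Int) = (rem : Int) := by omega
    rw [e1, e2, PySem.List.pyGetD_natCast, ezk]
    split_ifs with h1 h2 h3 h4
    · -- z[k] < remaining: z[i] = z[k]
      have hc1 : pvM l kN < rem := by exact_mod_cast h1
      have hMain : pvM l i = pvM l kN := by
        unfold pvM
        refine pvAScan_eq_of l (pvM l kN) _ _ ?_ ?_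
        · intro t ht
          refine ⟨by omega, ?_⟩
          rw [hMir t (by omega)]
          exact (kMat t ht).2
        · rintro ⟨hge, heq⟩
          have hstop := pvAScan_stop l (kN : Int) ((l.length : Int) - 1)
          have efst : ((pvAScan l (kN : Int) ((l.length : Int) - 1)).1 : Int) = (pvM l kN : Int) := rfl
          rw [efst] at hstop
          exact hstop ⟨by omega, ((hMir (pvM l kN) (by omega)).symm.trans heq)⟩
      rw [PySem.List.pySetD_natCast]
      refine ⟨by simp [hlen], pvCells_update l i z hi hlen hcells _ (by rw [hMain]), ?_⟩
      exact Or.inr ⟨Ln, Rn, rfl, rfl, by omega, hLnN, hRnLn, hMLn⟩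
    · -- remaining < z[k]: z[i] = remaining
      have hc2 : rem < pvM l kN := by exact_mod_cast h2
      have hMain : pvM l i = rem := by
        unfold pvM
        refine pvAScan_eq_of l rem _ _ ?_ ?_
        · intro t ht
          refine ⟨by omega, ?_⟩
          rw [hMir t ht]
          exact (kMat t (by omega)).2
        · rintro ⟨hge, heq⟩
          rcases Nat.eq_zero_or_pos Rn with hRn0 | hRn1
          · omega
          · have hstopL := pvAScan_stop l (Ln : Int) ((l.length : Int) - 1)
            have efstL : ((pvAScan l (Ln : Int) ((l.length : Int) - 1)).1 : Int) = ((Ln : Int) - Rn + 1) := by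
              have hf : (pvAScan l (Ln : Int) ((l.length : Int) - 1)).1 = pvM l Ln := rfl
              rw [hf, hMLn]; omega
            rw [efstL] at hstopL
            apply hstopL
            refine ⟨by omega, ?_⟩
            have i1 : (Ln : Int) - ((Ln : Int) - Rn + 1) = (i : Int) - rem := by omega
            have i2 : ((l.length : Int) - 1) - ((Ln : Int) - Rn + 1) = (kN : Int) - rem := by omega
            rw [i1, i2, heq]
            exact (kMat rem hc2).2.symm
      rw [PySem.List.pySetD_natCast]
      refine ⟨by simp [hlen], pvCells_update l i z hi hlen hcells _ (by rw [hMain]), ?_⟩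
      exact Or.inr ⟨Ln, Rn, rfl, rfl, by omega, hLnN, hRnLn, hMLn⟩
    · -- z[k] = remaining, z_box[1] - 1 < 0: z[i] = z[k]
      have hRn0 : Rn = 0 := by omega
      have hzkrem : pvM l kN = rem := by omega
      have hMain : pvM l i = rem := by
        unfold pvM
        refine pvAScan_eq_of l rem _ _ ?_ ?_
        · intro t ht
          refine ⟨by omega, ?_⟩
          rw [hMir t ht]
          exact (kMat t (by omega)).2
        · rintro ⟨hge, heq⟩
          omega
      rw [PySem.List.pySetD_natCast]
      refine ⟨by simp [hlen], pvCells_update l i z hi hlen hcells _ (by rw [hMain, hzkrem]), ?_⟩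
      exact Or.inr ⟨Ln, Rn, rfl, rfl, by omega, hLnN, hRnLn, hMLn⟩
    · -- z[k] = remaining, extension scan from z_box[1] - 1, new box found
      have hRn1 : 1 ≤ Rn := by omega
      have hzkrem : pvM l kN = rem := by omega
      rw [hzkrem] at h4 ⊢
      have hsnd := pvAScan_snd l ((Rn : Int) - 1) ((l.length : Int) - 1 - (rem : Int))
      have hfle := pvAScan_fst_le l ((Rn : Int) - 1) ((l.length : Int) - 1 - (rem : Int))
      set e : Nat := (pvAScan l ((Rn : Int) - 1) ((l.length : Int) - 1 - (rem : Int))).1 with he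
      have heRn : e ≤ Rn := by omega
      have hMain : pvM l i = rem + e := by
        unfold pvM
        refine pvAScan_eq_of l (rem + e) _ _ ?_ ?_
        · intro t ht
          by_cases htr : t < rem
          · refine ⟨by omega, ?_⟩
            rw [hMir t htr]
            exact (kMat t (by omega)).2
          · have hmm := pvAScan_matches l ((Rn : Int) - 1) ((l.length : Int) - 1 - (rem : Int)) (t - rem)
              (by rw [← he]; omega)
            have ei : ((Rn : Int) - 1) - ((t - rem : Nat) : Int) = (i : Int) - t := by omega
            have ej : ((l.length : Int) - 1 - (rem : Int)) - ((t - rem : Nat) : Int) = ((l.length : Int) - 1) - t := by omega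
            rw [ei, ej] at hmm
            exact ⟨by omega, hmm.2⟩
        · rintro ⟨hge, heq⟩
          have hstopR := pvAScan_stop l ((Rn : Int) - 1) ((l.length : Int) - 1 - (rem : Int))
          rw [← he] at hstopR
          apply hstopR
          have ei : ((Rn : Int) - 1) - (e : Int) = (i : Int) - ((rem + e : Nat) : Int) := by omega
          have ej : ((l.length : Int) - 1 - (rem : Int)) - (e : Int) = ((l.length : Int) - 1) - ((rem + e : Nat) : Int) := by omega
          rw [ei, ej]
          exact ⟨by omega, heq⟩
      rw [hsnd, PySem.List.pySetD_natCast]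
      refine ⟨by simp [hlen],
        pvCells_update l i z hi hlen hcells _ (by rw [hMain]; push_cast; ring), ?_⟩
      refine Or.inr ⟨i, Rn - e, rfl,
        (by omega : ((Rn : Int) - 1 - (e : Int) + 1) = ((Rn - e : Nat) : Int)),
        le_rfl, hi, by omega, by rw [hMain]; omega⟩
    · -- the extension scan always finds a new box: r.2 = Rn - 1 - e < i
      exfalso
      have hzkrem : pvM l kN = rem := by omega
      rw [hzkrem] at h4
      have hsnd := pvAScan_snd l ((Rn : Int) - 1) ((l.length : Int) - 1 - (rem : Int))
      rw [hsnd] at h4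
      have hfle := pvAScan_fst_le l ((Rn : Int) - 1) ((l.length : Int) - 1 - (rem : Int))
      omega
  · -- the naive scan branch
    simp only [pvAStep]
    rw [if_neg hbr]
    have hsnd := pvAScan_snd l (i : Int) ((l.length : Int) - 1)
    have hfle := pvAScan_fst_le l (i : Int) ((l.length : Int) - 1)
    have hMi : pvM l i = (pvAScan l (i : Int) ((l.length : Int) - 1)).1 := rfl
    by_cases hlt : (pvAScan l (i : Int) ((l.length : Int) - 1)).2 < (i : Int)
    · rw [if_pos hlt, hsnd, PySem.List.pySetD_natCast]
      rw [hsnd] at hlt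
      have hf1 : 1 ≤ (pvAScan l (i : Int) ((l.length : Int) - 1)).1 := by omega
      have hfle' : (pvAScan l (i : Int) ((l.length : Int) - 1)).1 ≤ i + 1 := by
        rcases hfle with hx | hx <;> omega
      refine ⟨by simp [hlen], pvCells_update l i z hi hlen hcells _ (by rw [hMi]), ?_⟩
      refine Or.inr ⟨i, i + 1 - (pvAScan l (i : Int) ((l.length : Int) - 1)).1, rfl,
        (by omega : ((i : Int) - ((pvAScan l (i : Int) ((l.length : Int) - 1)).1 : Int) + 1)
          = ((i + 1 - (pvAScan l (i : Int) ((l.length : Int) - 1)).1 : Nat) : Int)),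
        le_rfl, hi, by omega, by omega⟩
    · rw [if_neg hlt]
      rw [PySem.List.pySetD_natCast]
      refine ⟨by simp [hlen], pvCells_update l i z hi hlen hcells _ (by rw [hMi]), ?_⟩
      rcases hbox with ⟨hL, hR⟩ | ⟨Ln, Rn, hL, hR, hmLn, hLnN, hRnLn, hMLn⟩
      · exact Or.inl ⟨hL, hR⟩
      · exact Or.inr ⟨Ln, Rn, hL, hR, by omega, hLnN, hRnLn, hMLn⟩

lemma pvFold_inv (l : List Char) : ∀ (m : Nat), m ≤ l.length - 1 →
    ∀ st, pvInv l m st →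
    pvInv l 0 (((PySem.List.pyRange ((m : Int) - 1) (-1) (-1))).foldl (pvAStep l (l.length : Int)) st) := by
  intro m
  induction m with
  | zero =>
    intro _ st h
    rw [PySem.List.pyRange_neg_one_eq_nil (by omega)]
    simpa using h
  | succ m ih =>
    intro hm st h
    have e : ((m + 1 : Nat) : Int) - 1 = (m : Int) := by push_cast; ring
    rw [e, PySem.List.pyRange_neg_one_cons (by omega : (-1 : Int) < (m : Int))]
    simp only [List.foldl_cons]
    exact ih (by omega) _ (pvStep_inv l m hm st h)

-- ===== VERDICT (by name: the statement is the Claim_ definition above) =====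
theorem reverse_z_algorithm_spec : Claim_equal_reverse_z_algorithm := by
  unfold Claim_equal_reverse_z_algorithm
  intro s _ hpre
  unfold Spec_reverse_z_algorithm reverse_z_algorithm reverse_z_algorithm_alt
  simp only []
  have hn1 : 1 ≤ s.toList.length := by
    have : s.toList ≠ [] := by simp_all [Pre_reverse_z_algorithm]
    cases hl : s.toList <;> simp_all
  generalize hLs : s.toList = L at hn1 ⊢
  have e0 : ((L.length : Int) - 1 - 1) = ((L.length - 1 : Nat) : Int) - 1 := by omega
  have e1 : ((L.length : Int) - 1) = ((L.length - 1 : Nat) : Int) := by omega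
  rw [e0]
  have hinit : pvInv L (L.length - 1)
      (PySem.List.pySetD (List.replicate L.length (0 : Int)) ((L.length : Int) - 1) (L.length : Int),
       (L.length : Int) - 1, (L.length : Int) - 1) := by
    rw [e1, PySem.List.pySetD_natCast]
    refine ⟨by simp, ?_, Or.inl ⟨show ((L.length - 1 : Nat) : Int) = (L.length : Int) - 1 by omega, show ((L.length - 1 : Nat) : Int) = (L.length : Int) - 1 by omega⟩⟩
    intro j hj
    rw [pv_getD_set, pv_getD_replicate]
    by_cases hjN : j = L.length - 1
    · subst hjN
      rw [if_pos ⟨rfl, by rw [List.length_replicate]; omega⟩, if_pos rfl]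
    · rw [if_neg (by rw [List.length_replicate]; exact fun hc => hjN hc.1.symm),
          if_pos (by omega), if_neg hjN, if_neg (by omega)]
  have hfin := pvFold_inv L (L.length - 1) le_rfl _ hinit
  obtain ⟨hAlen, hAcells, -⟩ := hfin
  have hBlen : ((List.range (L.length - 1)).foldl
      (fun z i => z.set i ((pvBScan L L.length i 0 : Int))) (List.replicate L.length (L.length : Int))).length = L.length := by
    rw [pv_foldl_set_length]; simp
  apply List.ext_getElem (by rw [hAlen, hBlen])
  intro j h1 h2
  rw [← List.getD_eq_getElem _ 0, ← List.getD_eq_getElem _ 0]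
  have hjn : j < L.length := by rw [hAlen] at h1; exact h1
  rw [hAcells j hjn, pv_foldl_set_getD, pv_getD_replicate]
  by_cases hjN : j = L.length - 1
  · subst hjN
    rw [if_pos rfl, if_neg (by omega), if_pos (by omega)]
  · rw [if_neg hjN, if_pos (by omega), if_pos ⟨by omega, by rw [List.length_replicate]; omega⟩]
    rw [pvBScan_eq_pvM L j (by omega)]
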